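-- pv_equiv track=rewrite | github.com/chuksoo/CodeMasters | TIP101 - Intro to Technical Interview Prep/Unit 3 practice.py | sum_of_unique_elements
-- ===== SOURCE A (Python) =====
-- def sum_of_unique_elements(lst1, lst2):
--   freq_dict = {}
--   for val in lst1:
--     if val in freq_dict:
--       freq_dict[val] += 1
--     else:
--       freq_dict[val] = 1
--
--   lst2_set = set(lst2)
--   unique_sum = 0
--   for element, frequency in freq_dict.items():
--     if frequency == 1 and element not in lst2_set:
--       unique_sum += element
--   return unique_sum
-- ===== SOURCE B (Python) =====
-- def sum_of_unique_elements(lst1, lst2):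
--   s = set(lst2)
--   total = 0
--   prev = 0
--   cnt = 0
--   for x in sorted(lst1):
--     if cnt > 0 and x == prev:
--       cnt += 1
--     else:
--       if cnt == 1 and prev not in s:
--         total += prev
--       prev = x
--       cnt = 1
--   if cnt == 1 and prev not in s:
--     total += prev
--   return total
-- ===== Notes on version B (the rewrite author's own statement) =====
-- stated objective: alternative
-- what changed: Replaces A's frequency dictionary and items pass by sorting lst1 and doing one linear run-length scan over the sorted list, adding each run of length 1 whose value is not in set(lst2).
import Mathlib
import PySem

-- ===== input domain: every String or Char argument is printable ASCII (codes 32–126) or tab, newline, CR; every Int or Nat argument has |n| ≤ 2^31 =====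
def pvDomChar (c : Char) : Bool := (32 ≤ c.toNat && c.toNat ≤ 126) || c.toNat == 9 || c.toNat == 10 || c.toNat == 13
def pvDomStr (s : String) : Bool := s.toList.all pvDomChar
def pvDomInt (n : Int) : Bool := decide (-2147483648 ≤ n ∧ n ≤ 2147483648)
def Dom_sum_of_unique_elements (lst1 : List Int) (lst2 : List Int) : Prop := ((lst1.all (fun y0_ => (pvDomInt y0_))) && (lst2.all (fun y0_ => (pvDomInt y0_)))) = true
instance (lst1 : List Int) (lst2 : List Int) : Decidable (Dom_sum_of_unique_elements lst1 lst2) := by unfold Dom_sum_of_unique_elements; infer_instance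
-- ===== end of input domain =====

-- B replaces A's frequency dictionary by sorting lst1 and one run-length scan of the sorted list (alternative algorithm, not faster).

-- ===== PORT A =====
def sum_of_unique_elements (lst1 : List Int) (lst2 : List Int) : Int :=
  let freq_dict : PySem.Dict Int Int :=
    lst1.foldl (fun d val =>
      if d.contains val then d.insert val (d.getD val 0 + 1)
      else d.insert val 1) PySem.Dict.empty
  let lst2_set : PySem.Set Int := PySem.Set.ofList lst2
  freq_dict.items.foldl (fun unique_sum ef =>
    let (element, frequency) := ef
    if frequency == 1 && !(PySem.Set.contains lst2_set element) then unique_sum + element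
    else unique_sum) 0

-- ===== PORT B =====
-- loop body of B's for-loop: state (total, prev, cnt)
def pvStep (s : PySem.Set Int) (st : Int × Int × Int) (x : Int) : Int × Int × Int :=
  let (total, prev, cnt) := st
  if cnt > 0 && x == prev then (total, prev, cnt + 1)
  else ((if cnt == 1 && !(PySem.Set.contains s prev) then total + prev else total), x, 1)

def sum_of_unique_elements_alt (lst1 : List Int) (lst2 : List Int) : Int :=
  let s : PySem.Set Int := PySem.Set.ofList lst2
  let st := (PySem.List.sorted lst1 (fun x => x) false).foldl (pvStep s) (0, 0, 0)
  let (total, prev, cnt) := st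
  if cnt == 1 && !(PySem.Set.contains s prev) then total + prev else total

-- ===== PRECONDITION & SPEC =====
def Spec_sum_of_unique_elements (lst1 : List Int) (lst2 : List Int) (out : Int) : Prop := out = sum_of_unique_elements_alt lst1 lst2
instance (lst1 : List Int) (lst2 : List Int) (out : Int) : Decidable (Spec_sum_of_unique_elements lst1 lst2 out) := by unfold Spec_sum_of_unique_elements; infer_instance

-- ===== CLAIM (what is proved, stated in full; the proofs are below) =====
def Claim_equal_sum_of_unique_elements : Prop := ∀ (lst1 : List Int) (lst2 : List Int), Dom_sum_of_unique_elements lst1 lst2 → Spec_sum_of_unique_elements lst1 lst2 (sum_of_unique_elements lst1 lst2)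

-- ===== LEMMAS AND PROOFS =====

-- ---- A-side: A equals the filtered sum over lst1 ----
lemma getD_zero_of_not_contains (d : PySem.Dict Int Int) (v : Int)
    (h : d.contains v = false) : d.getD v 0 = 0 := by
  rw [PySem.Dict.contains_eq_isSome_get?] at h
  simp only [Option.isSome_eq_false_iff, Option.isNone_iff_eq_none] at h
  simp [PySem.Dict.getD, h]

lemma freq_fold_eq_counter (lst1 : List Int) :
    lst1.foldl (fun (d : PySem.Dict Int Int) val =>
      if d.contains val then d.insert val (d.getD val 0 + 1)
      else d.insert val 1) PySem.Dict.empty = PySem.Dict.counter lst1 := by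
  rw [← PySem.Dict.foldl_insert_getD_add_one_eq_counter]
  have hstep : (fun (d : PySem.Dict Int Int) val =>
      if d.contains val then d.insert val (d.getD val 0 + 1) else d.insert val 1) =
      fun (d : PySem.Dict Int Int) x => d.insert x (d.getD x 0 + 1) := by
    funext d val
    by_cases h : d.contains val
    · simp [h]
    · simp only [Bool.not_eq_true] at h
      simp [h, getD_zero_of_not_contains d val h]
  rw [hstep]

lemma foldl_if_add_eq_sum_filter (p : Int → Bool) (l : List Int) (a : Int) :
    l.foldl (fun acc x => if p x then acc + x else acc) a = a + (l.filter p).sum := by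
  induction l generalizing a with
  | nil => simp
  | cons x xs ih =>
    by_cases h : p x <;> simp [h, ih]; ring

lemma sum_filter_dedup (p : Int → Bool) (l : List Int)
    (hp : ∀ x, p x = true → l.count x = 1) :
    ((PySem.Set.ofList l).filter p).sum = (l.filter p).sum := by
  apply List.Perm.sum_eq
  refine (List.perm_ext_iff_of_nodup
      (List.Nodup.filter p (PySem.Set.nodup_ofList l))
      (List.nodup_iff_count_le_one.mpr fun a => ?_)).mpr fun a => by
    simp [List.mem_filter, PySem.Set.mem_ofList l]
  by_cases h : p a
  · rw [List.count_filter h, hp a h]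
  · rw [List.count_eq_zero.mpr fun hm => h (List.mem_filter.mp hm).2]
    exact Nat.zero_le 1

lemma intCast_beq_one (c : Nat) : ((c : Int) == 1) = (c == 1) := by
  cases h : (c == 1) <;> simp_all [beq_iff_eq, beq_eq_false_iff_ne]

lemma A_eq_filter_sum (lst1 lst2 : List Int) :
    sum_of_unique_elements lst1 lst2 =
      (lst1.filter (fun x => (lst1.count x == 1) && !(PySem.Set.contains (PySem.Set.ofList lst2) x))).sum := by
  unfold sum_of_unique_elements
  simp only [freq_fold_eq_counter, PySem.Dict.items_counter, List.foldl_map]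
  rw [foldl_if_add_eq_sum_filter
        (fun k => ((List.count k lst1 : Int) == 1) && !(PySem.Set.contains (PySem.Set.ofList lst2) k))]
  have hf : ∀ (m : List Int), m.filter
        (fun k => ((List.count k lst1 : Int) == 1) && !(PySem.Set.contains (PySem.Set.ofList lst2) k)) =
      m.filter (fun x => (lst1.count x == 1) && !(PySem.Set.contains (PySem.Set.ofList lst2) x)) := by
    intro m
    apply List.filter_congr
    intro x _
    rw [intCast_beq_one]
  rw [hf, sum_filter_dedup _ lst1 (fun x hx => by
    simp only [Bool.and_eq_true, beq_iff_eq] at hx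
    exact hx.1)]
  omega

-- ---- B-side: the run-length scan over a sorted list equals the same filtered sum ----

-- the flushed contribution of the pending run
def pvFlush (s : PySem.Set Int) (cnt prev : Int) : Int :=
  if cnt == 1 && !(PySem.Set.contains s prev) then prev else 0

-- a run of copies of prev only increments cnt
lemma foldl_step_run (s : PySem.Set Int) (run : List Int) (prev t : Int) (c : Int)
    (hc : 0 < c) (hrun : ∀ y ∈ run, y = prev) :
    run.foldl (pvStep s) (t, prev, c) = (t, prev, c + run.length) := by
  induction run generalizing c with
  | nil => simp
  | cons y ys ih =>
    have hy : y = prev := hrun y (by simp)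
    have hys : ∀ z ∈ ys, z = prev := fun z hz => hrun z (by simp [hz])
    simp only [List.foldl_cons, pvStep, hy]
    rw [if_pos (by simp [hc])]
    rw [ih (c + 1) (by omega) hys]
    simp; ring

lemma dropWhile_gt (x : Int) (xs : List Int) (h : (x :: xs).Pairwise (· ≤ ·)) :
    ∀ y ∈ xs.dropWhile (fun z => z == x), x < y := by
  cases hd : xs.dropWhile (fun z => z == x) with
  | nil => simp
  | cons h0 t =>
    intro y hy
    have hsub : (h0 :: t).Sublist xs := hd ▸ List.dropWhile_sublist _
    have hpw : (h0 :: t).Pairwise (· ≤ ·) := List.Pairwise.sublist hsub (List.pairwise_cons.mp h).2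
    have hh0 : ¬ (h0 == x) = true := by
      have := List.head?_dropWhile_not (fun z => z == x) xs
      rw [hd] at this; simp at this; simp [this]
    have hxh0 : x < h0 := by
      have hmem : h0 ∈ xs := hsub.subset (by simp)
      have : x ≤ h0 := (List.pairwise_cons.mp h).1 h0 hmem
      simp at hh0; omega
    rcases List.mem_cons.mp hy with rfl | hyt
    · exact hxh0
    · exact lt_of_lt_of_le hxh0 ((List.pairwise_cons.mp hpw).1 y hyt)

-- main invariant: over a sorted list whose elements all exceed prev (or with cnt = 0),
-- the scan plus final flush computes the pending flush plus the filtered sum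
lemma scan_sorted (s : PySem.Set Int) :
    ∀ (n : Nat) (l : List Int), l.length = n → l.Pairwise (· ≤ ·) →
    ∀ (t prev c : Int), (c = 0 ∨ ∀ y ∈ l, prev < y) →
    (let (total, pr, cnt) := l.foldl (pvStep s) (t, prev, c)
     if cnt == 1 && !(PySem.Set.contains s pr) then total + pr else total) =
      t + pvFlush s c prev +
      (l.filter (fun x => (l.count x == 1) && !(PySem.Set.contains s x))).sum := by
  intro n
  induction n using Nat.strong_induction_on with
  | _ n ih =>
  intro l hn hpw t prev c hcond
  cases l with
  | nil => simp only [List.foldl_nil, pvFlush, List.filter_nil, List.sum_nil]; split_ifs <;> ring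
  | cons x xs =>
    have hxprev : ¬ (0 < c ∧ x = prev) := by
      rcases hcond with h0 | hlt
      · omega
      · intro ⟨_, hx⟩; have := hlt x (by simp); omega
    -- first step takes the else branch
    have hstep1 : pvStep s (t, prev, c) x = (t + pvFlush s c prev, x, 1) := by
      simp only [pvStep, pvFlush]
      have hne : ¬ (c > 0 && x == prev) = true := by
        simp only [Bool.and_eq_true, decide_eq_true_eq, beq_iff_eq]
        rintro ⟨h1, h2⟩
        exact hxprev ⟨h1, h2⟩
      rw [if_neg hne]
      split_ifs with h <;> simp
    set run := xs.takeWhile (fun z => z == x) with hrun_def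
    set tail := xs.dropWhile (fun z => z == x) with htail_def
    have hsplit : xs = run ++ tail := (List.takeWhile_append_dropWhile).symm
    have hrun : ∀ y ∈ run, y = x := by
      intro y hy
      have := List.mem_takeWhile_imp hy
      simpa using this
    have htail_gt : ∀ y ∈ tail, x < y := dropWhile_gt x xs hpw
    have htail_pw : tail.Pairwise (· ≤ ·) :=
      List.Pairwise.sublist (List.dropWhile_sublist _) (List.pairwise_cons.mp hpw).2
    have hlen : tail.length < (x :: xs).length := by
      have : tail.length ≤ xs.length := List.length_dropWhile_le _ _
      simp; omega
    -- counts in x :: xs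
    have hcount_x : (x :: xs).count x = run.length + 1 := by
      have h0 : tail.count x = 0 := by
        rw [List.count_eq_zero]
        intro hm
        have := htail_gt x hm
        omega
      have h1 : run.count x = run.length := List.count_eq_length.mpr (fun y hy => (hrun y hy).symm ▸ rfl)
      rw [hsplit]
      simp [List.count_append, h0, h1]
    have hcount_tail : ∀ y ∈ tail, (x :: xs).count y = tail.count y := by
      intro y hy
      have hxy : x ≠ y := by have := htail_gt y hy; omega
      have h1 : run.count y = 0 :=
        List.count_eq_zero.mpr (fun hm => absurd (hrun y hm) (by have := htail_gt y hy; omega))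
      rw [hsplit]
      simp [List.count_append, h1, hxy]
    -- filtered sum decomposition
    have hfilter :
        ((x :: xs).filter (fun z => ((x :: xs).count z == 1) && !(PySem.Set.contains s z))).sum =
        pvFlush s (run.length + 1) x +
        (tail.filter (fun z => (tail.count z == 1) && !(PySem.Set.contains s z))).sum := by
      have hruns : (run.filter (fun z => ((x :: xs).count z == 1) && !(PySem.Set.contains s z))) = [] := by
        apply List.filter_eq_nil_iff.mpr
        intro y hy
        have hne : run ≠ [] := List.ne_nil_of_mem hy
        rw [hrun y hy, hcount_x]
        simp
        exact fun h => absurd h hne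
      have htails : (tail.filter (fun z => ((x :: xs).count z == 1) && !(PySem.Set.contains s z))) =
          (tail.filter (fun z => (tail.count z == 1) && !(PySem.Set.contains s z))) := by
        apply List.filter_congr
        intro y hy
        rw [hcount_tail y hy]
      have hcast : (x :: xs).filter (fun z => ((x :: xs).count z == 1) && !(PySem.Set.contains s z)) =
          (x :: (run ++ tail)).filter (fun z => ((x :: xs).count z == 1) && !(PySem.Set.contains s z)) := by
        rw [← hsplit]
      rw [hcast, List.filter_cons, List.filter_append, hruns, htails]
      by_cases hx1 : ((x :: xs).count x == 1 && !(PySem.Set.contains s x)) = true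
      · obtain ⟨h1, h2⟩ := Bool.and_eq_true _ _ ▸ hx1
        have hr0 : run.length = 0 := by
          rw [beq_iff_eq, hcount_x] at h1
          omega
        rw [if_pos hx1]
        simp only [List.nil_append, List.sum_cons]
        have hfl : pvFlush s ((run.length : Int) + 1) x = x := by
          unfold pvFlush
          have hc2 : ((((run.length : Int)) + 1 == 1) && !(PySem.Set.contains s x)) = true := by
            rw [hr0]
            simp only [Nat.cast_zero, zero_add, beq_self_eq_true, Bool.true_and]
            exact h2
          rw [if_pos hc2]
        rw [hfl]
      · rw [if_neg hx1]
        simp only [List.nil_append]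
        have hfl : pvFlush s ((run.length : Int) + 1) x = 0 := by
          unfold pvFlush
          have hcnd : ¬ ((((run.length : Int) + 1) == 1) && !(PySem.Set.contains s x)) = true := by
            intro hb
            obtain ⟨hb1, hb2⟩ := Bool.and_eq_true _ _ ▸ hb
            have hl0 : run.length = 0 := by
              rw [beq_iff_eq] at hb1
              omega
            exact hx1 (by rw [hcount_x, hl0]; simpa using hb2)
          rw [if_neg hcnd]
        rw [hfl, zero_add]
    -- put it together
    have hrunfold : run.foldl (pvStep s) (t + pvFlush s c prev, x, (1 : Int)) =
        (t + pvFlush s c prev, x, ((run.length : Int) + 1)) := by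
      have h := foldl_step_run s run x (t + pvFlush s c prev) 1 (by omega) hrun
      simpa [add_comm] using h
    have hIH := ih tail.length (by rw [← hn]; exact hlen) tail rfl htail_pw
        (t + pvFlush s c prev) x (run.length + 1) (Or.inr htail_gt)
    rw [List.foldl_cons, hstep1]
    conv_lhs => rw [hsplit, List.foldl_append, hrunfold]
    rw [hIH, hfilter]
    ring

-- B equals the filtered sum over lst1 (sorted lst1 is a permutation of lst1)
lemma B_eq_filter_sum (lst1 lst2 : List Int) :
    sum_of_unique_elements_alt lst1 lst2 =
      (lst1.filter (fun x => (lst1.count x == 1) && !(PySem.Set.contains (PySem.Set.ofList lst2) x))).sum := by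
  unfold sum_of_unique_elements_alt
  set s := PySem.Set.ofList lst2
  set m := PySem.List.sorted lst1 (fun x => x) false with hm
  have hperm : m.Perm lst1 := PySem.List.sorted_perm lst1 (fun x => x) false
  have hpw : m.Pairwise (· ≤ ·) := by
    have := PySem.List.sorted_pairwise lst1 (fun x => x)
    simpa using this
  have h := scan_sorted s m.length m rfl hpw 0 0 0 (Or.inl rfl)
  simp only [] at h ⊢
  rw [h]
  have hc : ∀ y, m.count y = lst1.count y := fun y => hperm.count_eq y
  have hfe : m.filter (fun x => (m.count x == 1) && !(PySem.Set.contains s x)) =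
      m.filter (fun x => (lst1.count x == 1) && !(PySem.Set.contains s x)) := by
    apply List.filter_congr
    intro y _
    rw [hc y]
  rw [hfe]
  have : (m.filter (fun x => (lst1.count x == 1) && !(PySem.Set.contains s x))).Perm
      (lst1.filter (fun x => (lst1.count x == 1) && !(PySem.Set.contains s x))) :=
    hperm.filter _
  rw [this.sum_eq]
  simp [pvFlush]

-- ===== VERDICT (by name: the statement is the Claim_ definition above) =====
theorem sum_of_unique_elements_spec : Claim_equal_sum_of_unique_elements := by
  intro lst1 lst2 _
  unfold Spec_sum_of_unique_elements
  rw [A_eq_filter_sum, B_eq_filter_sum]
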